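-- pv_equiv track=rewrite | github.com/doocs/leetcode | solution/2200-2299/2201.Count Artifacts That Can Be Extracted/Solution.py | digArtifacts
-- ===== SOURCE A (Python) =====
-- from typing import List
--
-- def digArtifacts(
--     n: int, artifacts: List[List[int]], dig: List[List[int]]
-- ) -> int:
--     def check(artifact):
--         r1, c1, r2, c2 = artifact
--         for x in range(r1, r2 + 1):
--             for y in range(c1, c2 + 1):
--                 if (x, y) not in s:
--                     return False
--         return True
--
--     s = {(i, j) for i, j in dig}
--     return sum(check(v) for v in artifacts)
-- ===== SOURCE B (Python) =====
-- from typing import List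
--
-- def digArtifacts(
--     n: int, artifacts: List[List[int]], dig: List[List[int]]
-- ) -> int:
--     cells = set()
--     for i, j in dig:
--         cells.add((i, j))
--     cnt = 0
--     for r1, c1, r2, c2 in artifacts:
--         area = max(0, r2 - r1 + 1) * max(0, c2 - c1 + 1)
--         hit = 0
--         for x, y in cells:
--             if r1 <= x <= r2 and c1 <= y <= c2:
--                 hit += 1
--         if hit == area:
--             cnt += 1
--     return cnt
-- ===== Notes on version B (the rewrite author's own statement) =====
-- stated objective: alternative
-- what changed: Instead of enumerating every cell of each artifact's rectangle and testing membership in the dig set, B sweeps the deduplicated dig cells once per artifact, counting how many fall inside the rectangle, and declares the artifact extractable when that count equals the rectangle's area.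
import Mathlib
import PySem

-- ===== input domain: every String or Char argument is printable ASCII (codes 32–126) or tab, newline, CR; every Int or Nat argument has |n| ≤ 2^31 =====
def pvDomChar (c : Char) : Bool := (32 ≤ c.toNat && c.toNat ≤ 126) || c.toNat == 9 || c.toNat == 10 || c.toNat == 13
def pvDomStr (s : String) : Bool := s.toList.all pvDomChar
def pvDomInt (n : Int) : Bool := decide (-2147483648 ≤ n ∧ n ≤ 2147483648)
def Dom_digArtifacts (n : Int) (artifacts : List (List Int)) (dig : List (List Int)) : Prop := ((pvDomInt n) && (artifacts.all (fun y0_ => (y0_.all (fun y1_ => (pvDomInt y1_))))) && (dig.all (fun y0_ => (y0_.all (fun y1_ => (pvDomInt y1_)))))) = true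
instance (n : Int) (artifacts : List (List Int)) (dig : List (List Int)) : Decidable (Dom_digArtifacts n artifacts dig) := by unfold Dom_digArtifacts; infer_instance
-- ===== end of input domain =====

-- B replaces A's per-cell membership test over each artifact's rectangle by one sweep of the
-- deduplicated dig cells per artifact, counting cells inside the rectangle against its area
-- (objective: alternative; the proof shows the return values agree).

-- ===== PORT A =====
-- A-side helper: {(i, j) for i, j in dig} — a dig row with length ≠ 2 raises in Python (outside Pre_)
def pvPairA (d : List Int) : Int × Int :=
  match d with
  | [i, j] => (i, j)
  | _ => (0, 0)

-- A's inner 'check(artifact)': nested for-loops with early 'return False' = .all over the ranges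
def pvCheckA (s : PySem.Set (Int × Int)) (artifact : List Int) : Bool :=
  match artifact with
  | [r1, c1, r2, c2] =>
      (PySem.List.pyRange r1 (r2 + 1) 1).all (fun x =>
        (PySem.List.pyRange c1 (c2 + 1) 1).all (fun y => PySem.Set.contains s (x, y)))
  | _ => false

def digArtifacts (n : Int) (artifacts : List (List Int)) (dig : List (List Int)) : Int :=
  let s : PySem.Set (Int × Int) := PySem.Set.ofList (dig.map pvPairA)
  artifacts.foldl (fun acc v => acc + (if pvCheckA s v then 1 else 0)) 0

-- ===== PORT B =====
def digArtifacts_alt (n : Int) (artifacts : List (List Int)) (dig : List (List Int)) : Int :=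
  -- 'for i, j in dig: cells.add((i, j))' — a row of length ≠ 2 raises in Python (outside Pre_)
  let cells : PySem.Set (Int × Int) := dig.foldl (fun s d =>
    match d with
    | [i, j] => PySem.Set.add s (i, j)
    | _ => PySem.Set.add s (0, 0)) PySem.Set.empty
  artifacts.foldl (fun cnt a =>
    match a with
    | [r1, c1, r2, c2] =>
        let area : Int := max 0 (r2 - r1 + 1) * max 0 (c2 - c1 + 1)
        let hit : Int := cells.foldl (fun h p =>
          if r1 ≤ p.1 ∧ p.1 ≤ r2 ∧ c1 ≤ p.2 ∧ p.2 ≤ c2 then h + 1 else h) 0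
        if hit = area then cnt + 1 else cnt
    | _ => cnt) 0

-- ===== PRECONDITION & SPEC =====
-- Pre_ excludes exactly the inputs on which Python A raises ValueError while unpacking:
-- a dig row that is not a pair, or an artifact row that is not a quadruple.
def Pre_digArtifacts (n : Int) (artifacts : List (List Int)) (dig : List (List Int)) : Prop :=
  (∀ a ∈ artifacts, a.length = 4) ∧ (∀ d ∈ dig, d.length = 2)
instance (n : Int) (artifacts : List (List Int)) (dig : List (List Int)) : Decidable (Pre_digArtifacts n artifacts dig) := by unfold Pre_digArtifacts; infer_instance

def pvWitness_digArtifacts : Int × List (List Int) × List (List Int) :=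
  (2, [[0, 0, 0, 1], [1, 1, 1, 1]], [[0, 0], [0, 1], [1, 1]])

def Spec_digArtifacts (n : Int) (artifacts : List (List Int)) (dig : List (List Int)) (out : Int) : Prop := out = digArtifacts_alt n artifacts dig
instance (n : Int) (artifacts : List (List Int)) (dig : List (List Int)) (out : Int) : Decidable (Spec_digArtifacts n artifacts dig out) := by unfold Spec_digArtifacts; infer_instance

-- ===== CLAIM (what is proved, stated in full; the proofs are below) =====
def Claim_equal_digArtifacts : Prop := ∀ (n : Int) (artifacts : List (List Int)) (dig : List (List Int)), Dom_digArtifacts n artifacts dig → Pre_digArtifacts n artifacts dig → Spec_digArtifacts n artifacts dig (digArtifacts n artifacts dig)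

-- ===== LEMMAS AND PROOFS =====

-- B's inner fold over the dig set counts the cells inside the rectangle.
lemma pv_foldl_count (l : List (Int × Int)) (r1 c1 r2 c2 : Int) (acc : Int) :
    l.foldl (fun h p => if r1 ≤ p.1 ∧ p.1 ≤ r2 ∧ c1 ≤ p.2 ∧ p.2 ≤ c2 then h + 1 else h) acc
      = acc + (l.countP (fun p => decide (r1 ≤ p.1 ∧ p.1 ≤ r2 ∧ c1 ≤ p.2 ∧ p.2 ≤ c2)) : Int) := by
  induction l generalizing acc with
  | nil => simp
  | cons p t ih =>
      by_cases h : r1 ≤ p.1 ∧ p.1 ≤ r2 ∧ c1 ≤ p.2 ∧ p.2 ≤ c2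
      · simp [List.foldl_cons, h, ih]
        ring
      · simp [List.foldl_cons, h, ih]

-- the rectangle as a Finset; its cardinality is B's 'area'
lemma pv_area_eq (r1 c1 r2 c2 : Int) :
    max 0 (r2 - r1 + 1) * max 0 (c2 - c1 + 1)
      = (((Finset.Icc r1 r2) ×ˢ (Finset.Icc c1 c2)).card : Int) := by
  rw [Finset.card_product]
  simp [Int.card_Icc]
  have h1 : r2 + 1 - r1 = r2 - r1 + 1 := by ring
  have h2 : c2 + 1 - c1 = c2 - c1 + 1 := by ring
  rw [h1, h2, max_comm (r2 - r1 + 1) 0, max_comm (c2 - c1 + 1) 0]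

-- Core equivalence for one artifact: all rectangle cells dug ⟺ the number of distinct dug
-- cells inside the rectangle equals the rectangle's cardinality.
lemma pv_check_iff (l : List (Int × Int)) (hnd : l.Nodup) (r1 c1 r2 c2 : Int) :
    ((PySem.List.pyRange r1 (r2 + 1) 1).all (fun x =>
        (PySem.List.pyRange c1 (c2 + 1) 1).all (fun y => PySem.Set.contains l (x, y))) = true)
    ↔ l.countP (fun p => decide (r1 ≤ p.1 ∧ p.1 ≤ r2 ∧ c1 ≤ p.2 ∧ p.2 ≤ c2))
        = ((Finset.Icc r1 r2) ×ˢ (Finset.Icc c1 c2)).card := by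
  classical
  set R : Finset (Int × Int) := (Finset.Icc r1 r2) ×ˢ (Finset.Icc c1 c2) with hR
  have hmemR : ∀ p : Int × Int, p ∈ R ↔ (r1 ≤ p.1 ∧ p.1 ≤ r2 ∧ c1 ≤ p.2 ∧ p.2 ≤ c2) := by
    intro p
    simp [hR, Finset.mem_product, Finset.mem_Icc]
    tauto
  have hLHS : ((PySem.List.pyRange r1 (r2 + 1) 1).all (fun x =>
      (PySem.List.pyRange c1 (c2 + 1) 1).all (fun y => PySem.Set.contains l (x, y))) = true)
      ↔ ∀ p ∈ R, p ∈ l := by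
    simp only [List.all_eq_true, PySem.List.mem_pyRange_one, PySem.Set.contains_iff]
    constructor
    · rintro h ⟨x, y⟩ hp
      rw [hmemR] at hp
      exact h x ⟨hp.1, by omega⟩ y ⟨hp.2.2.1, by omega⟩
    · intro h x hx y hy
      exact h (x, y) ((hmemR (x, y)).2 ⟨hx.1, by omega, hy.1, by omega⟩)
  set q : Int × Int → Bool := fun p => decide (r1 ≤ p.1 ∧ p.1 ≤ r2 ∧ c1 ≤ p.2 ∧ p.2 ≤ c2) with hq
  set F : Finset (Int × Int) := l.toFinset.filter (fun p => q p = true) with hF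
  have hcount : l.countP q = F.card := by
    rw [hF, ← List.toFinset_filter, List.toFinset_card_of_nodup (hnd.filter q),
        List.countP_eq_length_filter]
  have hFR : F ⊆ R := by
    intro p hp
    rw [hF, Finset.mem_filter] at hp
    exact (hmemR p).2 (by simpa [hq] using hp.2)
  rw [hLHS, hcount]
  constructor
  · intro h
    have hRF : R ⊆ F := by
      intro p hp
      rw [hF, Finset.mem_filter]
      refine ⟨List.mem_toFinset.2 (h p hp), by simpa [hq] using (hmemR p).1 hp⟩
    rw [Finset.Subset.antisymm hFR hRF]
  · intro h
    have hFeq : F = R := Finset.eq_of_subset_of_card_le hFR (le_of_eq h.symm)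
    intro p hp
    have hpF : p ∈ F := hFeq ▸ hp
    rw [hF, Finset.mem_filter] at hpF
    exact List.mem_toFinset.1 hpF.1

-- per-artifact agreement of the two fold steps, for a deduplicated cell list
lemma pv_step_eq (l : List (Int × Int)) (hnd : l.Nodup) (acc : Int) (v : List Int) :
    acc + (if pvCheckA l v then 1 else 0)
      = (match v with
         | [r1, c1, r2, c2] =>
             let area : Int := max 0 (r2 - r1 + 1) * max 0 (c2 - c1 + 1)
             let hit : Int := l.foldl (fun h p =>
               if r1 ≤ p.1 ∧ p.1 ≤ r2 ∧ c1 ≤ p.2 ∧ p.2 ≤ c2 then h + 1 else h) 0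
             if hit = area then acc + 1 else acc
         | _ => acc) := by
  match v with
  | [] => simp [pvCheckA]
  | [a] => simp [pvCheckA]
  | [a, b] => simp [pvCheckA]
  | [a, b, c] => simp [pvCheckA]
  | (a :: b :: c :: d :: e :: t) => cases t <;> simp [pvCheckA]
  | [r1, c1, r2, c2] =>
      simp only [pvCheckA]
      rw [pv_foldl_count, pv_area_eq, zero_add]
      by_cases h : ((PySem.List.pyRange r1 (r2 + 1) 1).all (fun x =>
          (PySem.List.pyRange c1 (c2 + 1) 1).all (fun y => PySem.Set.contains l (x, y))) = true)
      · rw [if_pos h, (pv_check_iff l hnd r1 c1 r2 c2).1 h, if_pos rfl]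
      · have hne : l.countP (fun p => decide (r1 ≤ p.1 ∧ p.1 ≤ r2 ∧ c1 ≤ p.2 ∧ p.2 ≤ c2))
            ≠ ((Finset.Icc r1 r2) ×ˢ (Finset.Icc c1 c2)).card := fun hc =>
          h ((pv_check_iff l hnd r1 c1 r2 c2).2 hc)
        have hne' : (l.countP (fun p => decide (r1 ≤ p.1 ∧ p.1 ≤ r2 ∧ c1 ≤ p.2 ∧ p.2 ≤ c2)) : Int)
            ≠ (((Finset.Icc r1 r2) ×ˢ (Finset.Icc c1 c2)).card : Int) := by exact_mod_cast hne
        rw [if_neg h, if_neg hne', add_zero]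

-- ===== VERDICT (by name: the statement is the Claim_ definition above) =====
theorem digArtifacts_spec : Claim_equal_digArtifacts := by
  intro n artifacts dig _ _
  unfold Spec_digArtifacts digArtifacts digArtifacts_alt
  have hstep : ∀ (s : PySem.Set (Int × Int)) (d : List Int),
      (match d with
       | [i, j] => PySem.Set.add s (i, j)
       | _ => PySem.Set.add s (0, 0)) = PySem.Set.add s (pvPairA d) := by
    intro s d
    match d with
    | [] => rfl
    | [a] => rfl
    | [i, j] => rfl
    | a :: b :: c :: t => rfl
  have hcells : dig.foldl (fun s d =>
      match d with
      | [i, j] => PySem.Set.add s (i, j)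
      | _ => PySem.Set.add s (0, 0)) PySem.Set.empty
      = PySem.Set.ofList (dig.map pvPairA) := by
    simp only [hstep]
    rw [← List.foldl_map]
    rfl
  rw [hcells]
  exact PySem.List.foldl_congr_mem artifacts _ _ 0
    (fun acc v _ => pv_step_eq (PySem.Set.ofList (dig.map pvPairA))
      (PySem.Set.nodup_ofList (dig.map pvPairA)) acc v)
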